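-- pv_equiv track=rewrite | github.com/Gokulakrishnan-info/reception_bot | voice_agent.py | detect_incomplete_speech
-- ===== SOURCE A (Python) =====
-- def detect_incomplete_speech(text):
--     """
--     Detect if speech was likely cut off or incomplete.
--     Returns True if speech seems incomplete.
--     """
--     if not text:
--         return True
--
--     text = text.strip()
--
--     # Check for very short responses
--     if len(text) < 3:
--         return True
--
--     # Check for incomplete sentences (ending with common incomplete patterns)
--     incomplete_patterns = [
--         "and", "but", "or", "so", "because", "if", "when", "where", "how",
--         "what", "who", "why", "which", "that", "the", "a", "an", "in", "on",
--         "at", "to", "for", "of", "with", "by", "from", "up", "down"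
--     ]
--
--     text_lower = text.lower()
--     for pattern in incomplete_patterns:
--         if text_lower.endswith(f" {pattern}"):
--             return True
--
--     # Check for trailing prepositions or articles
--     if text_lower.endswith((" the", " a", " an", " in", " on", " at", " to", " for")):
--         return True
--
--     return False
-- ===== SOURCE B (Python) =====
-- _WORDS = frozenset(
--     "and but or so because if when where how what who why which that "
--     "the a an in on at to for of with by from up down".split()
-- )
--
--
-- def detect_incomplete_speech(text):
--     if not text:
--         return True
--     text = text.strip()
--     if len(text) < 3:
--         return True
--     ended = False
--     word = ""
--     for ch in text.lower():
--         if ch == ' ':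
--             ended, word = True, ""
--         else:
--             word += ch
--     return ended and word in _WORDS
-- ===== Notes on version B (the rewrite author's own statement) =====
-- stated objective: alternative
-- what changed: Replaces the ~35 endswith passes over the pattern list (plus the redundant tuple endswith check) with a single forward scan maintaining the current last word and a seen-space flag, followed by one membership test in a frozenset built by splitting a string literal.
import Mathlib
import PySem

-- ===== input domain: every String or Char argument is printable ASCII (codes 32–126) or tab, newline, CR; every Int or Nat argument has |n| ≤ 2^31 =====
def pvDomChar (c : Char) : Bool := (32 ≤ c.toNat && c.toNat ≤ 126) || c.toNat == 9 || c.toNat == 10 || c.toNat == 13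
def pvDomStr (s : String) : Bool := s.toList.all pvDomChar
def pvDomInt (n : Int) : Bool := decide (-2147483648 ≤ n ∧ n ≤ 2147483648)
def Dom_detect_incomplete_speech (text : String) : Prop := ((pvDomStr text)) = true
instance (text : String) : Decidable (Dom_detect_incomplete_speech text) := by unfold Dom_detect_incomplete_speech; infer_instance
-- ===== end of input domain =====

-- B replaces A's ~35 endswith passes by one forward scan (seen-space flag + current last word)
-- and a single set-membership test (objective: alternative; same observable behaviour).

-- ===== PORT A =====
def pvPatternsA : List String :=
  ["and", "but", "or", "so", "because", "if", "when", "where", "how",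
   "what", "who", "why", "which", "that", "the", "a", "an", "in", "on",
   "at", "to", "for", "of", "with", "by", "from", "up", "down"]

def pvTupleA : List String := [" the", " a", " an", " in", " on", " at", " to", " for"]

def detect_incomplete_speech (text : String) : Bool :=
  if text = "" then true
  else
    let t := PySem.Str.strip text
    if PySem.Str.len t < 3 then true
    else
      let low := PySem.Str.lower t
      if pvPatternsA.any (fun p => PySem.Str.endswith low (" " ++ p)) then true
      else if pvTupleA.any (fun p => PySem.Str.endswith low p) then true
      else false

-- ===== PORT B =====
-- Source B builds its word set by splitting one string literal
def pvWordsB : List String :=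
  PySem.Str.split₀ ("and but or so because if when where how what who why which that " ++
    "the a an in on at to for of with by from up down")

-- one iteration of Source B's forward `for ch in text.lower()` loop over state (ended, word)
def pvStepB (st : Bool × List Char) (c : Char) : Bool × List Char :=
  if c = ' ' then (true, []) else (st.1, st.2 ++ [c])

def detect_incomplete_speech_alt (text : String) : Bool :=
  if text = "" then true
  else
    let t := PySem.Str.strip text
    if PySem.Str.len t < 3 then true
    else
      let st := (PySem.Str.lower t).toList.foldl pvStepB (false, [])
      st.1 && pvWordsB.contains (String.ofList st.2)

-- ===== PRECONDITION & SPEC =====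
def Spec_detect_incomplete_speech (text : String) (out : Bool) : Prop := out = detect_incomplete_speech_alt text
instance (text : String) (out : Bool) : Decidable (Spec_detect_incomplete_speech text out) := by unfold Spec_detect_incomplete_speech; infer_instance

-- ===== CLAIM (what is proved, stated in full; the proofs are below) =====
def Claim_equal_detect_incomplete_speech : Prop := ∀ (text : String), Dom_detect_incomplete_speech text → Spec_detect_incomplete_speech text (detect_incomplete_speech text)

-- ===== LEMMAS AND PROOFS =====

-- the split-built word list is exactly A's pattern list
lemma pv_words_eq : pvWordsB = pvPatternsA := by decide

-- membership of a rebuilt string in a String list, as membership of its char list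
lemma pv_contains_mk (l : List String) (w : List Char) :
    l.contains (String.ofList w) = (l.map String.toList).contains w := by
  induction l with
  | nil => rfl
  | cons s l ih =>
    simp only [List.contains_cons, List.map_cons, ih]
    congr 1
    simp [String.ext_iff, eq_comm]

lemma pv_takeWhile_append (p : Char → Bool) (v x : List Char) (hv : ∀ a ∈ v, p a) :
    (v ++ x).takeWhile p = v ++ x.takeWhile p := by
  induction v with
  | nil => rfl
  | cons a v ih =>
    simp only [List.cons_append, List.takeWhile_cons, hv a (by simp),
      ih (fun b hb => hv b (by simp [hb]))]
    simp

lemma pv_takeWhile_append_stop (p : Char → Bool) (v x : List Char)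
    (hv : ∃ a ∈ v, ¬ p a) : (v ++ x).takeWhile p = v.takeWhile p := by
  induction v with
  | nil => obtain ⟨a, ha, _⟩ := hv; cases ha
  | cons a v ih =>
    by_cases hp : p a
    · simp only [List.cons_append, List.takeWhile_cons, hp, if_pos]
      obtain ⟨b, hb, hbp⟩ := hv
      rcases List.mem_cons.mp hb with rfl | hb'
      · exact absurd hp hbp
      · rw [ih ⟨b, hb', hbp⟩]
    · simp [hp]

-- invariant of Source B's forward loop: the flag records whether a space occurred,
-- the accumulated word is everything after the last space
lemma pv_fold_spec (l : List Char) (b : Bool) (acc : List Char) :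
    l.foldl pvStepB (b, acc) =
      ((b || decide (' ' ∈ l)),
       if ' ' ∈ l then (l.reverse.takeWhile (· ≠ ' ')).reverse else acc ++ l) := by
  induction l generalizing b acc with
  | nil => simp [List.foldl]
  | cons c r ih =>
    by_cases hc : c = ' '
    · subst hc
      simp only [List.foldl_cons, pvStepB, if_pos, ih, List.mem_cons, true_or,
        decide_true, Bool.or_true]
      rw [Prod.mk.injEq]
      refine ⟨rfl, ?_⟩
      by_cases hr : ' ' ∈ r
      · rw [if_pos hr, List.reverse_cons, pv_takeWhile_append_stop _ _ _
          ⟨' ', List.mem_reverse.mpr hr, by simp⟩]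
      · rw [if_neg hr]
        rw [List.reverse_cons, pv_takeWhile_append _ _ _ (by
          intro a ha
          simp only [decide_eq_true_eq]
          exact fun h => hr (List.mem_reverse.mp (h ▸ ha)))]
        simp
    · simp only [List.foldl_cons, pvStepB, if_neg hc, ih]
      have hmem : (' ' ∈ c :: r) ↔ (' ' ∈ r) := by
        simp [List.mem_cons, Ne.symm hc]
      rw [Prod.mk.injEq]
      refine ⟨by simp [hmem], ?_⟩
      by_cases hr : ' ' ∈ r
      · rw [if_pos hr, if_pos (hmem.mpr hr), List.reverse_cons, pv_takeWhile_append_stop _ _ _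
          ⟨' ', List.mem_reverse.mpr hr, by simp⟩]
      · rw [if_neg hr, if_neg (fun h => hr (hmem.mp h))]
        simp

-- ending with " w" (w spaceless) says exactly: l has a space and its last word is w
lemma pv_suffix_iff (w l : List Char) (hw : ' ' ∉ w) :
    (' ' :: w) <:+ l ↔ (' ' ∈ l ∧ l.reverse.takeWhile (· ≠ ' ') = w.reverse) := by
  rw [← List.reverse_prefix]
  constructor
  · rintro ⟨rest, hr⟩
    simp only [List.reverse_cons] at hr
    refine ⟨?_, ?_⟩
    · have : ' ' ∈ l.reverse := by rw [← hr]; simp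
      simpa using this
    · rw [← hr, List.append_assoc,
        pv_takeWhile_append _ _ _ (by
          intro a ha
          simp only [decide_eq_true_eq]
          exact fun h => hw (List.mem_reverse.mp (h ▸ ha)))]
      simp
  · rintro ⟨hmem, htk⟩
    have hsplit := List.takeWhile_append_dropWhile (p := fun x => decide (x ≠ ' ')) (l := l.reverse)
    cases hdd : l.reverse.dropWhile (fun x => decide (x ≠ ' ')) with
    | nil =>
        exfalso
        rw [hdd, List.append_nil] at hsplit
        have hlw : l = w := by
          have : l.reverse = w.reverse := by rw [← hsplit, htk]
          exact List.reverse_inj.mp this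
        exact hw (hlw ▸ hmem)
    | cons x xs =>
        have hne : l.reverse.dropWhile (fun x => decide (x ≠ ' ')) ≠ [] := by rw [hdd]; simp
        have hx : x = ' ' := by
          have := List.head_dropWhile_not (p := fun x => decide (x ≠ ' ')) (l := l.reverse) hne
          simp only [hdd, List.head_cons] at this
          simpa using this
        refine ⟨xs, ?_⟩
        have hdd' : l.reverse.dropWhile (fun x => decide (x ≠ ' ')) = ' ' :: xs := by
          rw [hdd, hx]
        rw [List.reverse_cons, ← htk]
        conv_rhs => rw [← hsplit, hdd']
        simp

-- every pattern word is spaceless, and every tuple pattern is a space plus such a word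
lemma pv_words_spaceless : ∀ s ∈ pvPatternsA, ' ' ∉ s.toList := by decide
lemma pv_tuple_shape :
    ∀ p ∈ pvTupleA, ∃ s ∈ pvPatternsA, p.toList = ' ' :: s.toList := by decide

-- the core: A's endswith cascade equals B's forward scan, for any string
lemma pv_core (low : String) :
    (if pvPatternsA.any (fun p => PySem.Str.endswith low (" " ++ p)) then true
     else if pvTupleA.any (fun p => PySem.Str.endswith low p) then true
     else false)
    = (let st := low.toList.foldl pvStepB (false, [])
       st.1 && pvWordsB.contains (String.ofList st.2)) := by
  have hend : ∀ (p : List Char), ' ' ∉ p →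
      (PySem.Chars.endswith low.toList (' ' :: p) = true ↔
        (' ' ∈ low.toList ∧ low.toList.reverse.takeWhile (· ≠ ' ') = p.reverse)) := by
    intro p hp
    rw [PySem.Chars.endswith_iff]
    exact pv_suffix_iff p low.toList hp
  simp only [pv_fold_spec, Bool.false_or, pv_words_eq]
  by_cases hm : ' ' ∈ low.toList
  · rw [if_pos hm]
    simp only [decide_eq_true hm, Bool.true_and]
    set tk := low.toList.reverse.takeWhile (· ≠ ' ') with htk
    rw [pv_contains_mk]
    by_cases hc : (pvPatternsA.map String.toList).contains tk.reverse = true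
    · rw [hc]
      obtain ⟨w, hwmem, hw⟩ := by
        simpa only [List.contains_eq_mem, List.mem_map, decide_eq_true_eq] using hc
      have hany : pvPatternsA.any (fun p => PySem.Str.endswith low (" " ++ p)) = true := by
        rw [List.any_eq_true]
        refine ⟨w, hwmem, ?_⟩
        simp only [PySem.Str.endswith_eq, String.toList_append]
        rw [show (" " : String).toList = [' '] from rfl]
        rw [List.singleton_append]
        rw [hend w.toList (pv_words_spaceless w hwmem)]
        exact ⟨hm, by rw [hw, List.reverse_reverse]⟩
      rw [if_pos hany]
    · rw [Bool.not_eq_true] at hc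
      rw [hc]
      have hany1 : pvPatternsA.any (fun p => PySem.Str.endswith low (" " ++ p)) = false := by
        rw [List.any_eq_false]
        intro p hp
        simp only [PySem.Str.endswith_eq, String.toList_append]
        rw [show (" " : String).toList = [' '] from rfl, List.singleton_append]
        intro habs
        have := (hend p.toList (pv_words_spaceless p hp)).mp habs
        have : (pvPatternsA.map String.toList).contains tk.reverse = true := by
          simp only [List.contains_eq_mem, List.mem_map, decide_eq_true_eq]
          exact ⟨p, hp, by rw [this.2]; simp⟩
        rw [hc] at this
        exact Bool.false_ne_true this
      have hany2 : pvTupleA.any (fun p => PySem.Str.endswith low p) = false := by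
        rw [List.any_eq_false]
        intro p hp
        obtain ⟨s, hsmem, hs⟩ := pv_tuple_shape p hp
        simp only [PySem.Str.endswith_eq, hs]
        intro habs
        have := (hend s.toList (pv_words_spaceless s hsmem)).mp habs
        have : (pvPatternsA.map String.toList).contains tk.reverse = true := by
          simp only [List.contains_eq_mem, List.mem_map, decide_eq_true_eq]
          exact ⟨s, hsmem, by rw [this.2]; simp⟩
        rw [hc] at this
        exact Bool.false_ne_true this
      rw [if_neg (by rw [hany1]; exact Bool.false_ne_true), if_neg (by rw [hany2]; exact Bool.false_ne_true)]
  · simp only [decide_eq_false hm, Bool.false_and]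
    have hno : ∀ (p : List Char), PySem.Chars.endswith low.toList (' ' :: p) = false := by
      intro p
      rw [Bool.eq_false_iff, Ne, PySem.Chars.endswith_iff]
      intro habs
      exact hm (habs.subset (by simp))
    have hany1 : pvPatternsA.any (fun p => PySem.Str.endswith low (" " ++ p)) = false := by
      rw [List.any_eq_false]
      intro p hp
      simp only [PySem.Str.endswith_eq, String.toList_append]
      rw [show (" " : String).toList = [' '] from rfl, List.singleton_append, hno]
      simp
    have hany2 : pvTupleA.any (fun p => PySem.Str.endswith low p) = false := by
      rw [List.any_eq_false]
      intro p hp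
      obtain ⟨s, _, hs⟩ := pv_tuple_shape p hp
      simp only [PySem.Str.endswith_eq, hs]
      rw [hno]
      simp
    rw [if_neg (by rw [hany1]; exact Bool.false_ne_true), if_neg (by rw [hany2]; exact Bool.false_ne_true)]

-- ===== VERDICT (by name: the statement is the Claim_ definition above) =====
theorem detect_incomplete_speech_spec : Claim_equal_detect_incomplete_speech := by
  intro text _
  unfold Spec_detect_incomplete_speech detect_incomplete_speech detect_incomplete_speech_alt
  by_cases h0 : text = ""
  · rw [if_pos h0, if_pos h0]
  · rw [if_neg h0, if_neg h0]
    by_cases h1 : PySem.Str.len (PySem.Str.strip text) < 3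
    · rw [if_pos h1, if_pos h1]
    · rw [if_neg h1, if_neg h1]
      exact pv_core (PySem.Str.lower (PySem.Str.strip text))
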